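-- pv_equiv track=rewrite | github.com/froelofs/signlab | vertaler/functionsGrammar.py | negating
-- ===== SOURCE A (Python) =====
-- def negating(context, question = False):
-- 	newcontext = []
-- 	negationwords = ['geen', 'niemand', 'nergens', 'niets', 'nooit', 'nog_niet', \
-- 	'wil_niet', 'mag_niet', 'kan_niet', 'lukt_niet', 'hoeft_niet','doe_niet']
-- 	last = len(context)
-- 	#Ignores questionmark at the end of the sentence
-- 	buffer = 0
-- 	if question:
-- 		buffer += 1
-- 	#Rejects sentences where negation is already satisfied
-- 	insertion = False
-- 	for i, tuple in enumerate(context):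
-- 		newcontext.append(tuple)
-- 		word = tuple[0]
-- 		#Ignores if already manually negated or affirmed
-- 		if word == 'n(' or word == 'a(':
-- 			return context
-- 		#Adds start of negation
-- 		if word in negationwords:
-- 			newcontext.insert(i, ('n(', '', ''))
-- 			insertion = True
-- 		#Adds end of negation
-- 		if i + 1 + buffer == last and insertion:
-- 			newcontext.append((')n', '', ''))
--
-- 	return newcontext
-- ===== SOURCE B (Python) =====
-- NEGATIONWORDS = frozenset(['geen', 'niemand', 'nergens', 'niets', 'nooit', 'nog_niet',
--     'wil_niet', 'mag_niet', 'kan_niet', 'lukt_niet', 'hoeft_niet', 'doe_niet'])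
--
--
-- def negating(context, question=False):
--     words = [t[0] for t in context]
--     # a manually negated/affirmed sentence is returned unchanged
--     if any(w == 'n(' or w == 'a(' for w in words):
--         return context
--     neg = [i for i, w in enumerate(words) if w in NEGATIONWORDS]
--     newcontext = list(context)
--     for i in neg:
--         newcontext.insert(i, ('n(', '', ''))
--     buffer = 1 if question else 0
--     i0 = len(context) - 1 - buffer
--     if i0 >= 0 and any(i <= i0 for i in neg):
--         newcontext.insert(len(context) - buffer + len(neg), (')n', '', ''))
--     return newcontext
-- ===== Notes on version B (the rewrite author's own statement) =====
-- stated objective: alternative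
-- what changed: A interleaves marker insertion with a single enumerate loop carrying an insertion flag and an early return; B first scans once for manual-negation words and negation indices, then builds the output by bulk-inserting the open markers into a copy and placing the close marker at one computed position.
import Mathlib
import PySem

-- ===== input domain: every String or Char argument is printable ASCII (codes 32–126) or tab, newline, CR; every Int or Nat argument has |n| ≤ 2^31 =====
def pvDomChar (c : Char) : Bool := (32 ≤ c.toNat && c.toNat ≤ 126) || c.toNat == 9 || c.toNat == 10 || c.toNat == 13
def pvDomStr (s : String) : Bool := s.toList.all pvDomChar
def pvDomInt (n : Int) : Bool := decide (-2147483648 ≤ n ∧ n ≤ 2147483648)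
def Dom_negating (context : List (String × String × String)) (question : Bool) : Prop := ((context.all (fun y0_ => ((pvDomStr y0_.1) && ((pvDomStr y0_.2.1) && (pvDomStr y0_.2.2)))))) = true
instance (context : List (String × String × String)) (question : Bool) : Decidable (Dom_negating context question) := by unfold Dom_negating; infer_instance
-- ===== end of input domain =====

-- B separates a single "find negation indices / detect manual negation" scan from the output
-- construction (bulk inserts plus one computed close-marker position); same return value as A.

def negWords : List String := ["geen", "niemand", "nergens", "niets", "nooit", "nog_niet",
  "wil_niet", "mag_niet", "kan_niet", "lukt_niet", "hoeft_niet", "doe_niet"]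

def mkOpen : String × String × String := ("n(", "", "")
def mkClose : String × String × String := (")n", "", "")

-- ===== PORT A =====
-- A's loop, step for step: state (newcontext, insertion); `none` = the early `return context`.
-- Every `list.insert` index here is ≤ the list's length, where Python insert = List.insertIdx.
def negLoopA (last buffer : Nat) :
    List (String × String × String) → Nat → List (String × String × String) → Bool →
    Option (List (String × String × String))
  | [], _, nc, _ => some nc
  | t :: rest, i, nc, ins =>
    let nc1 := nc ++ [t]
    if t.1 = "n(" ∨ t.1 = "a(" then none
    else
      let p : Bool := decide (t.1 ∈ negWords)
      let nc2 := if p then nc1.insertIdx i mkOpen else nc1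
      let ins2 := p || ins
      let nc3 := if i + 1 + buffer = last ∧ ins2 = true then nc2 ++ [mkClose] else nc2
      negLoopA last buffer rest (i + 1) nc3 ins2

def negating (context : List (String × String × String)) (question : Bool) :
    List (String × String × String) :=
  let last := context.length
  let buffer : Nat := if question then 1 else 0
  match negLoopA last buffer context 0 [] false with
  | none => context
  | some nc => nc

-- ===== PORT B =====
-- [i for i, w in enumerate(words) if w in NEGATIONWORDS]
def negIdx : List String → Nat → List Nat
  | [], _ => []
  | w :: ws, i => if w ∈ negWords then i :: negIdx ws (i + 1) else negIdx ws (i + 1)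

def negating_alt (context : List (String × String × String)) (question : Bool) :
    List (String × String × String) :=
  let words := context.map (fun t => t.1)
  if words.any (fun w => w == "n(" || w == "a(") then context
  else
    let neg := negIdx words 0
    let newc := neg.foldl (fun l i => l.insertIdx i mkOpen) context
    let buffer : Nat := if question then 1 else 0
    let i0 : Int := (context.length : Int) - 1 - buffer
    -- both insert positions are ≤ the list's length, where Python insert = List.insertIdx
    if 0 ≤ i0 ∧ neg.any (fun i => decide ((i : Int) ≤ i0)) then
      newc.insertIdx (context.length - buffer + neg.length) mkClose
    else newc

-- ===== PRECONDITION & SPEC =====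
def Spec_negating (context : List (String × String × String)) (question : Bool) (out : List (String × String × String)) : Prop := out = negating_alt context question
instance (context : List (String × String × String)) (question : Bool) (out : List (String × String × String)) : Decidable (Spec_negating context question out) := by unfold Spec_negating; infer_instance

-- ===== CLAIM (what is proved, stated in full; the proofs are below) =====
def Claim_equal_negating : Prop := ∀ (context : List (String × String × String)) (question : Bool), Dom_negating context question → Spec_negating context question (negating context question)

-- ===== LEMMAS AND PROOFS =====

theorem ins_take {α : Type} (l : List α) (n : Nat) (a : α) (h : n ≤ l.length) :
    l.insertIdx n a = l.take n ++ a :: l.drop n := by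
  induction l generalizing n with
  | nil => have : n = 0 := Nat.le_zero.1 h; subst this; simp
  | cons x xs ih =>
    cases n with
    | zero => simp
    | succ n => simp [List.insertIdx_succ_cons, ih n (by simpa using h)]

theorem ins_append {α : Type} (l r : List α) (n : Nat) (a : α) (h : n ≤ l.length) :
    (l ++ r).insertIdx n a = (l.insertIdx n a) ++ r := by
  rw [ins_take _ _ _ h, ins_take (l ++ r) _ _ (by simp; omega),
    List.take_append_of_le_length h, List.drop_append_of_le_length h]
  simp

theorem ins_at_len {α : Type} (l : List α) (a : α) : l.insertIdx l.length a = l ++ [a] := by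
  rw [ins_take _ _ _ (le_refl _)]; simp

theorem len_ins {α : Type} (l : List α) (n : Nat) (a : α) (h : n ≤ l.length) :
    (l.insertIdx n a).length = l.length + 1 := by
  simp [List.length_insertIdx, h]

theorem mem_negIdx_ge (ws : List String) (i j : Nat) (h : j ∈ negIdx ws i) : i ≤ j := by
  induction ws generalizing i with
  | nil => simp [negIdx] at h
  | cons w ws ih =>
    simp only [negIdx] at h
    split at h
    · rcases List.mem_cons.1 h with h | h
      · omega
      · exact le_of_lt (lt_of_lt_of_le (Nat.lt_succ_self i) (ih (i + 1) h))
    · exact le_of_lt (lt_of_lt_of_le (Nat.lt_succ_self i) (ih (i + 1) h))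

theorem negLoopA_early (last buffer : Nat) (rest : List (String × String × String))
    (i : Nat) (nc : List (String × String × String)) (ins : Bool)
    (h : ∃ t ∈ rest, t.1 = "n(" ∨ t.1 = "a(") :
    negLoopA last buffer rest i nc ins = none := by
  induction rest generalizing i nc ins with
  | nil => simp at h
  | cons t rest ih =>
    rcases h with ⟨u, hu, hw⟩
    rcases List.mem_cons.1 hu with rfl | hu
    · simp [negLoopA, hw]
    · by_cases he : t.1 = "n(" ∨ t.1 = "a("
      · simp [negLoopA, he]
      · simp only [negLoopA, if_neg he]
        exact ih _ _ _ ⟨u, hu, hw⟩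

theorem ins_mid {α : Type} (X : List α) (u a : α) :
    (X ++ [u]).insertIdx X.length a = X ++ a :: [u] := by
  rw [ins_take _ _ _ (by simp)]; simp

-- the phase after (or without) the close-marker append: no end-condition can fire any more
theorem negLoopA_post (last buffer : Nat) (rest : List (String × String × String))
    (i : Nat) (nc : List (String × String × String)) (ins : Bool)
    (hcl : ∀ t ∈ rest, ¬(t.1 = "n(" ∨ t.1 = "a("))
    (hlast : last ≤ i + buffer) (hlen : i ≤ nc.length) :
    negLoopA last buffer rest i nc ins =
      some ((negIdx (rest.map (fun t => t.1)) i).foldl (fun l j => l.insertIdx j mkOpen) (nc ++ rest)) := by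
  induction rest generalizing i nc ins with
  | nil => simp [negLoopA, negIdx]
  | cons t rest ih =>
    have hne : ¬(t.1 = "n(" ∨ t.1 = "a(") := hcl t (by simp)
    have hclr : ∀ u ∈ rest, ¬(u.1 = "n(" ∨ u.1 = "a(") := fun u hu => hcl u (by simp [hu])
    have hfire : i + 1 + buffer ≠ last := by omega
    by_cases hp : t.1 ∈ negWords
    · have hstep : negLoopA last buffer (t :: rest) i nc ins =
          negLoopA last buffer rest (i + 1) ((nc ++ [t]).insertIdx i mkOpen) true := by
        simp [negLoopA, hne, hp, hfire]
      rw [hstep, ih _ _ _ hclr (by omega)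
        (by rw [len_ins _ _ _ (by simp; omega)]; simp; omega)]
      congr 1
      simp only [List.map_cons, negIdx, if_pos hp, List.foldl_cons]
      congr 1
      rw [show nc ++ t :: rest = (nc ++ [t]) ++ rest by simp,
        ins_append (nc ++ [t]) rest i mkOpen (by simp; omega)]
    · have hstep : negLoopA last buffer (t :: rest) i nc ins =
          negLoopA last buffer rest (i + 1) (nc ++ [t]) ins := by
        simp [negLoopA, hne, hp, hfire]
      rw [hstep, ih _ _ _ hclr (by omega) (by simp; omega)]
      congr 1
      simp [negIdx, hp]

theorem negLoopA_main (rest : List (String × String × String))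
    (i c : Nat) (nc : List (String × String × String)) (ins : Bool) (last buffer : Nat)
    (hcl : ∀ t ∈ rest, ¬(t.1 = "n(" ∨ t.1 = "a("))
    (hbuf : buffer ≤ 1) (hlast : i + rest.length = last)
    (hlen : nc.length = i + c) (hins : ins = decide (0 < c)) :
    negLoopA last buffer rest i nc ins =
      some (
        if buffer + 1 ≤ rest.length ∧
            (0 < c ∨ ∃ j ∈ negIdx (rest.map (fun t => t.1)) i, j + buffer + 1 ≤ last) then
          ((negIdx (rest.map (fun t => t.1)) i).foldl (fun l j => l.insertIdx j mkOpen) (nc ++ rest)).insertIdx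
            (last - buffer + c + (negIdx (rest.map (fun t => t.1)) i).length) mkClose
        else
          (negIdx (rest.map (fun t => t.1)) i).foldl (fun l j => l.insertIdx j mkOpen) (nc ++ rest)) := by
  induction rest generalizing i c nc ins with
  | nil => simp [negLoopA, negIdx]
  | cons t rest ih =>
    have hne : ¬(t.1 = "n(" ∨ t.1 = "a(") := hcl t (by simp)
    have hclr : ∀ u ∈ rest, ¬(u.1 = "n(" ∨ u.1 = "a(") := fun u hu => hcl u (by simp [hu])
    by_cases hfire : i + 1 + buffer = last
    · -- this is the iteration where the end-condition can fire
      have hrl : rest.length = buffer := by simp at hlast; omega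
      by_cases hp : t.1 ∈ negWords
      · -- fires with the open marker inserted this very step
        have hstep : negLoopA last buffer (t :: rest) i nc ins =
            negLoopA last buffer rest (i + 1) ((nc ++ [t]).insertIdx i mkOpen ++ [mkClose]) true := by
          simp [negLoopA, hne, hp, hfire]
        have hn2 : ((nc ++ [t]).insertIdx i mkOpen).length = i + c + 2 := by
          rw [len_ins _ _ _ (by simp; omega)]; simp; omega
        rw [hstep, negLoopA_post _ _ _ _ _ _ hclr (by omega) (by simp [hn2]; omega)]
        congr 1
        rw [if_pos ⟨by simp; omega, Or.inr ⟨i, by simp [negIdx, hp], by omega⟩⟩]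
        match rest, hrl with
        | [], hrl =>
          have hb0 : buffer = 0 := by simpa using hrl.symm
          subst hb0
          simp only [List.map_nil, negIdx, List.map_cons, if_pos hp, List.foldl_nil,
            List.foldl_cons, List.append_nil]
          rw [show last - 0 + c + [i].length = ((nc ++ [t]).insertIdx i mkOpen).length by
            simp [hn2]; omega]
          rw [ins_at_len]
        | [u], hrl =>
          have hb1 : buffer = 1 := by simpa using hrl.symm
          subst hb1
          have hiu : i + 1 ≤ ((nc ++ [t]).insertIdx i mkOpen).length := by omega
          by_cases hq : u.1 ∈ negWords
          · simp only [List.map_cons, List.map_nil, negIdx, if_pos hp, if_pos hq,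
              List.foldl_cons, List.foldl_nil]
            rw [show (nc ++ [t]).insertIdx i mkOpen ++ [mkClose] ++ [u] =
                ((nc ++ [t]).insertIdx i mkOpen ++ [mkClose]) ++ [u] by simp,
              ins_append ((nc ++ [t]).insertIdx i mkOpen ++ [mkClose]) [u] (i + 1) mkOpen
                (by simp [hn2]; omega),
              ins_append ((nc ++ [t]).insertIdx i mkOpen) [mkClose] (i + 1) mkOpen (by omega)]
            rw [show nc ++ t :: u :: [] = (nc ++ [t]) ++ [u] by simp,
              ins_append (nc ++ [t]) [u] i mkOpen (by simp; omega),
              ins_append ((nc ++ [t]).insertIdx i mkOpen) [u] (i + 1) mkOpen hiu]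
            rw [show last - 1 + c + [i, i+1].length =
                (((nc ++ [t]).insertIdx i mkOpen).insertIdx (i+1) mkOpen).length by
              rw [len_ins _ _ _ hiu]; simp; omega]
            rw [ins_mid]; simp
          · simp only [List.map_cons, List.map_nil, negIdx, if_pos hp, if_neg hq,
              List.foldl_cons, List.foldl_nil]
            rw [show nc ++ t :: u :: [] = (nc ++ [t]) ++ [u] by simp,
              ins_append (nc ++ [t]) [u] i mkOpen (by simp; omega)]
            rw [show last - 1 + c + [i].length = ((nc ++ [t]).insertIdx i mkOpen).length by
              simp [hn2]; omega]
            rw [ins_mid]; simp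
        | u :: v :: rest2, hrl => simp at hrl; omega
      · -- no new open marker; fires only if some earlier iteration inserted one
        by_cases hc0 : 0 < c
        · have hit : ins = true := by rw [hins]; simpa using hc0
          have hstep : negLoopA last buffer (t :: rest) i nc ins =
              negLoopA last buffer rest (i + 1) ((nc ++ [t]) ++ [mkClose]) true := by
            simp [negLoopA, hne, hp, hfire, hit]
          rw [hstep, negLoopA_post _ _ _ _ _ _ hclr (by omega) (by simp; omega)]
          congr 1
          rw [if_pos ⟨by simp; omega, Or.inl hc0⟩]
          match rest, hrl with
          | [], hrl =>
            have hb0 : buffer = 0 := by simpa using hrl.symm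
            subst hb0
            simp only [List.map_nil, List.map_cons, negIdx, if_neg hp, List.foldl_nil,
              List.append_nil]
            rw [show last - 0 + c + ([] : List Nat).length = (nc ++ [t]).length by simp; omega]
            rw [ins_at_len]
          | [u], hrl =>
            have hb1 : buffer = 1 := by simpa using hrl.symm
            subst hb1
            by_cases hq : u.1 ∈ negWords
            · simp only [List.map_cons, List.map_nil, negIdx, if_neg hp, if_pos hq,
                List.foldl_cons, List.foldl_nil]
              rw [show nc ++ [t] ++ [mkClose] ++ [u] = ((nc ++ [t]) ++ [mkClose]) ++ [u] by simp,
                ins_append ((nc ++ [t]) ++ [mkClose]) [u] (i + 1) mkOpen (by simp; omega),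
                ins_append (nc ++ [t]) [mkClose] (i + 1) mkOpen (by simp; omega)]
              rw [show nc ++ t :: u :: [] = (nc ++ [t]) ++ [u] by simp,
                ins_append (nc ++ [t]) [u] (i + 1) mkOpen (by simp; omega)]
              rw [show last - 1 + c + [i+1].length = ((nc ++ [t]).insertIdx (i+1) mkOpen).length by
                rw [len_ins _ _ _ (by simp; omega)]; simp; omega]
              rw [ins_mid]; simp
            · simp only [List.map_cons, List.map_nil, negIdx, if_neg hp, if_neg hq,
                List.foldl_nil]
              rw [show nc ++ t :: u :: [] = (nc ++ [t]) ++ [u] by simp]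
              rw [show last - 1 + c + ([] : List Nat).length = (nc ++ [t]).length by simp; omega]
              rw [ins_mid]; simp
          | u :: v :: rest2, hrl => simp at hrl; omega
        · -- insertion is still False: the end-condition does not fire after all
          have hif : ins = false := by rw [hins]; simpa using hc0
          have hc : c = 0 := by omega
          have hstep : negLoopA last buffer (t :: rest) i nc ins =
              negLoopA last buffer rest (i + 1) (nc ++ [t]) ins := by
            simp [negLoopA, hne, hp, hfire, hif]
          rw [hstep, hif, negLoopA_post _ _ _ _ _ _ hclr (by omega) (by simp; omega)]
          congr 1
          rw [if_neg]
          · simp [negIdx, hp]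
          · rintro ⟨-, h | ⟨j, hj, hjl⟩⟩
            · omega
            · simp only [List.map_cons, negIdx, if_neg hp] at hj
              have := mem_negIdx_ge _ _ _ hj
              omega
    · -- ordinary iteration: the end-condition cannot fire here
      by_cases hp : t.1 ∈ negWords
      · have hstep : negLoopA last buffer (t :: rest) i nc ins =
            negLoopA last buffer rest (i + 1) ((nc ++ [t]).insertIdx i mkOpen) true := by
          simp [negLoopA, hne, hp, hfire]
        have hn2 : ((nc ++ [t]).insertIdx i mkOpen).length = i + c + 2 := by
          rw [len_ins _ _ _ (by simp; omega)]; simp; omega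
        rw [hstep, ih (i + 1) (c + 1) _ true hclr (by simp at hlast ⊢; omega)
          (by omega) (by simp)]
        congr 1
        have hbase : (negIdx ((t :: rest).map (fun t => t.1)) i).foldl
              (fun l j => l.insertIdx j mkOpen) (nc ++ t :: rest) =
            (negIdx (rest.map (fun t => t.1)) (i + 1)).foldl
              (fun l j => l.insertIdx j mkOpen) ((nc ++ [t]).insertIdx i mkOpen ++ rest) := by
          simp only [List.map_cons, negIdx, if_pos hp, List.foldl_cons]
          congr 1
          rw [show nc ++ t :: rest = (nc ++ [t]) ++ rest by simp,
            ins_append (nc ++ [t]) rest i mkOpen (by simp; omega)]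
        have hiff : (buffer + 1 ≤ (t :: rest).length ∧
              (0 < c ∨ ∃ j ∈ negIdx ((t :: rest).map (fun t => t.1)) i, j + buffer + 1 ≤ last)) ↔
            (buffer + 1 ≤ rest.length ∧
              (0 < c + 1 ∨ ∃ j ∈ negIdx (rest.map (fun t => t.1)) (i + 1), j + buffer + 1 ≤ last)) := by
          simp only [List.length_cons] at hlast ⊢
          constructor
          · rintro ⟨h1, -⟩
            exact ⟨by omega, Or.inl (by omega)⟩
          · rintro ⟨h1, -⟩
            refine ⟨by omega, Or.inr ⟨i, ?_, by omega⟩⟩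
            simp [negIdx, hp]
        by_cases hcnd : buffer + 1 ≤ rest.length ∧
            (0 < c + 1 ∨ ∃ j ∈ negIdx (rest.map (fun t => t.1)) (i + 1), j + buffer + 1 ≤ last)
        · rw [if_pos (hiff.mpr hcnd), if_pos hcnd, hbase]
          congr 1
          simp only [List.map_cons, negIdx, if_pos hp, List.length_cons]
          omega
        · rw [if_neg (fun h => hcnd (hiff.mp h)), if_neg hcnd, hbase]
      · have hstep : negLoopA last buffer (t :: rest) i nc ins =
            negLoopA last buffer rest (i + 1) (nc ++ [t]) ins := by
          simp [negLoopA, hne, hp, hfire]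
        rw [hstep, ih (i + 1) c _ ins hclr (by simp at hlast ⊢; omega)
          (by simp; omega) hins]
        congr 1
        have hbase : (negIdx ((t :: rest).map (fun t => t.1)) i).foldl
              (fun l j => l.insertIdx j mkOpen) (nc ++ t :: rest) =
            (negIdx (rest.map (fun t => t.1)) (i + 1)).foldl
              (fun l j => l.insertIdx j mkOpen) ((nc ++ [t]) ++ rest) := by
          simp [negIdx, hp]
        have hiff : (buffer + 1 ≤ (t :: rest).length ∧
              (0 < c ∨ ∃ j ∈ negIdx ((t :: rest).map (fun t => t.1)) i, j + buffer + 1 ≤ last)) ↔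
            (buffer + 1 ≤ rest.length ∧
              (0 < c ∨ ∃ j ∈ negIdx (rest.map (fun t => t.1)) (i + 1), j + buffer + 1 ≤ last)) := by
          simp only [List.length_cons] at hlast ⊢
          simp only [List.map_cons, negIdx, if_neg hp]
          constructor
          · rintro ⟨h1, h2⟩; exact ⟨by omega, h2⟩
          · rintro ⟨h1, h2⟩; exact ⟨by omega, h2⟩
        by_cases hcnd : buffer + 1 ≤ rest.length ∧
            (0 < c ∨ ∃ j ∈ negIdx (rest.map (fun t => t.1)) (i + 1), j + buffer + 1 ≤ last)
        · rw [if_pos (hiff.mpr hcnd), if_pos hcnd, hbase]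
          congr 1
          simp [negIdx, hp]
        · rw [if_neg (fun h => hcnd (hiff.mp h)), if_neg hcnd, hbase]

-- ===== VERDICT (by name: the statement is the Claim_ definition above) =====
theorem negating_spec : Claim_equal_negating := by
  intro context question _
  unfold Spec_negating
  simp only [negating, negating_alt]
  by_cases hE : ∃ t ∈ context, t.1 = "n(" ∨ t.1 = "a("
  · have hB : (List.any (context.map fun t => t.1) fun w => w == "n(" || w == "a(") = true := by
      rcases hE with ⟨t, ht, hw⟩
      simp only [List.any_eq_true, List.mem_map]
      exact ⟨t.1, ⟨t, ht, rfl⟩, by rcases hw with h | h <;> simp [h]⟩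
    rw [negLoopA_early _ _ _ _ _ _ hE, if_pos hB]
  · have hcl : ∀ t ∈ context, ¬(t.1 = "n(" ∨ t.1 = "a(") := fun t ht hw => hE ⟨t, ht, hw⟩
    have hB : ¬((List.any (context.map fun t => t.1) fun w => w == "n(" || w == "a(") = true) := by
      simp only [List.any_eq_true, List.mem_map]
      rintro ⟨w, ⟨t, ht, rfl⟩, hw⟩
      exact hcl t ht (by simpa using hw)
    rw [if_neg hB]
    have hbuf : (if question then (1 : Nat) else 0) ≤ 1 := by cases question <;> simp
    rw [negLoopA_main context 0 0 [] false context.length _ hcl hbuf (by simp) (by simp)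
      (by simp)]
    simp only [List.nil_append, Nat.add_zero]
    have hiff : ((if question then (1 : Nat) else 0) + 1 ≤ context.length ∧
          (0 < 0 ∨ ∃ j ∈ negIdx (context.map fun t => t.1) 0,
            j + (if question then (1 : Nat) else 0) + 1 ≤ context.length)) ↔
        (0 ≤ (context.length : Int) - 1 - (if question then (1 : Nat) else 0) ∧
          (negIdx (context.map fun t => t.1) 0).any
            (fun i => decide ((i : Int) ≤ (context.length : Int) - 1 -
              (if question then (1 : Nat) else 0))) = true) := by
      simp only [List.any_eq_true, decide_eq_true_eq, Nat.lt_irrefl, false_or]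
      constructor
      · rintro ⟨h1, j, hj, h2⟩
        exact ⟨by omega, j, hj, by omega⟩
      · rintro ⟨h1, j, hj, h2⟩
        exact ⟨by omega, j, hj, by omega⟩
    by_cases hcond : (0 ≤ (context.length : Int) - 1 - (if question then (1 : Nat) else 0) ∧
        (negIdx (context.map fun t => t.1) 0).any
          (fun i => decide ((i : Int) ≤ (context.length : Int) - 1 -
            (if question then (1 : Nat) else 0))) = true)
    · rw [if_pos (hiff.mpr hcond), if_pos hcond]
    · rw [if_neg (fun h => hcond (hiff.mp h)), if_neg hcond]
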